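-- pv_equiv track=rewrite | github.com/rjherrera/IIC2343 | T1/14632152.py | inverso_aditivo
-- ===== SOURCE A (Python) =====
-- def es_negativo(base, representacion):
--     if base % 2 == 0:
--         return representacion[0] >= base / 2
--     numeros = representacion[::-1]
--     while numeros:
--         actual = numeros.pop()
--         if actual < base // 2:
--             return False
--         if actual > base // 2:
--             return True
--     return False
--
-- def decimal(base, representacion):
--     res = 0
--     for i in range(len(representacion) - 1, -1, -1):
--         res += representacion[i] * base ** (len(representacion) - i - 1)
--     return res
--
-- def suma_carry(base, representacion, sumando):
--     resultado = representacion[:]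
--     for i in range(len(representacion) - 1, -1, -1):
--         if representacion[i] + sumando < base:
--             resultado[i] = representacion[i] + sumando
--             break
--         resultado[i] = 0
--     return resultado
--
-- def inverso_aditivo(base, representacion):
--     inverso = []
--     rep = [0] + representacion[:]
--     comp = [base - i - 1 for i in rep][1:]
--     inverso = suma_carry(base, comp, 1)
--     if es_negativo(base, representacion):
--         numero = -decimal(base, inverso)
--     else:
--         numero = decimal(base, representacion)
--     return numero, inverso
-- ===== SOURCE B (Python) =====
-- def inverso_aditivo(base, representacion):
--     # one right-to-left pass with a carry flag instead of complement-list + suma_carry;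
--     # value computed by Horner instead of explicit powers
--     if not representacion:
--         return 0, []
--     out = []
--     carry = True
--     for d in reversed(representacion):
--         if carry:
--             if d > 0:
--                 out.append(base - d)
--                 carry = False
--             else:
--                 out.append(0)
--         else:
--             out.append(base - d - 1)
--     inverso = out[::-1]
--     half = base // 2
--     if base % 2 == 0:
--         neg = representacion[0] >= half
--     else:
--         neg = False
--         for d in representacion:
--             if d != half:
--                 neg = d > half
--                 break
--     if neg:
--         v = 0
--         for d in inverso:
--             v = v * base + d
--         numero = -v
--     else:
--         v = 0
--         for d in representacion:
--             v = v * base + d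
--         numero = v
--     return numero, inverso
-- ===== Notes on version B (the rewrite author's own statement) =====
-- stated objective: alternative
-- what changed: Replaces the complement-list-plus-suma_carry construction with a single right-to-left carry pass and the explicit power-sum decimal() with a Horner fold; the sign test is a single first-differing-digit scan.
import Mathlib
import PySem

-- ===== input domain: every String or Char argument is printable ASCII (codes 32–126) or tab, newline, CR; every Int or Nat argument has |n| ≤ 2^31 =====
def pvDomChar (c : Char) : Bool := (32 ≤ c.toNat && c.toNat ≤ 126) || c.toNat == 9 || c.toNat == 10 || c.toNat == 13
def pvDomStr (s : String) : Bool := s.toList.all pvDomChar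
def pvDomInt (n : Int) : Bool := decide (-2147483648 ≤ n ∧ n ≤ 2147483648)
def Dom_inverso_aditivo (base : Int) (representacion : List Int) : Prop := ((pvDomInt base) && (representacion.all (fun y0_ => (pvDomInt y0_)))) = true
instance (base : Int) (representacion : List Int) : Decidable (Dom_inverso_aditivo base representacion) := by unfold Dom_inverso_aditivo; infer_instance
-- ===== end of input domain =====

-- B replaces A's complement-list + suma_carry construction by one right-to-left carry pass
-- and A's power-sum `decimal` by a Horner fold (objective: alternative algorithm).
-- A raises IndexError on an even base with empty representacion; Pre_ excludes exactly that input.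

-- ===== PORT A =====
-- es_negativo, odd-base branch: the `while numeros: actual = numeros.pop()` loop pops the
-- LAST element of representacion[::-1], i.e. scans representacion left to right; transcribed
-- as structural recursion over representacion.
def esNegOdd (base : Int) : List Int → Bool
  | [] => false
  | actual :: rest =>
      if actual < PySem.Int.floordiv base 2 then false
      else if actual > PySem.Int.floordiv base 2 then true
      else esNegOdd base rest

-- es_negativo.  Even branch compares representacion[0] >= base / 2 (true division); since base
-- is even there, base / 2 is the exact integer base // 2, so floordiv is exact.  On an empty
-- list Python raises IndexError (excluded by Pre_); the port defaults the lookup to 0.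
def esNegativo (base : Int) (representacion : List Int) : Bool :=
  if PySem.Int.mod base 2 = 0 then
    decide ((PySem.List.pyGet? representacion 0).getD 0 ≥ PySem.Int.floordiv base 2)
  else esNegOdd base representacion

-- decimal: the loop `for i in range(len-1, -1, -1): res += rep[i]*base**(len-i-1)` transcribed
-- as countdown recursion on the index (fuel = i+1 handles index i); same terms, same order.
def decimalGo (base : Int) (rep : List Int) : Nat → Int → Int
  | 0, res => res
  | i + 1, res => decimalGo base rep i (res + rep.getD i 0 * base ^ (rep.length - (i + 1)))

def decimalA (base : Int) (representacion : List Int) : Int :=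
  decimalGo base representacion representacion.length 0

-- suma_carry: the right-to-left loop with break transcribed as structural recursion over the
-- reversed list (an unvisited prefix stays the copied input, a break keeps the rest unchanged).
def sumaCarryRev (base sumando : Int) : List Int → List Int
  | [] => []
  | d :: rest => if d + sumando < base then (d + sumando) :: rest else 0 :: sumaCarryRev base sumando rest

def sumaCarry (base : Int) (representacion : List Int) (sumando : Int) : List Int :=
  (sumaCarryRev base sumando representacion.reverse).reverse

def inverso_aditivo (base : Int) (representacion : List Int) : Int × List Int :=
  let rep : List Int := 0 :: representacion
  let comp : List Int := (rep.map (fun i => base - i - 1)).drop 1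
  let inverso : List Int := sumaCarry base comp 1
  let numero : Int :=
    if esNegativo base representacion then -(decimalA base inverso)
    else decimalA base representacion
  (numero, inverso)

-- ===== PORT B =====
-- the `for d in reversed(representacion)` loop with carry flag and out.append, then out[::-1]
def bInvLoop (base : Int) : List Int → List Int → Bool → List Int
  | [], out, _ => out
  | d :: rest, out, carry =>
      if carry then
        if d > 0 then bInvLoop base rest (out ++ [base - d]) false
        else bInvLoop base rest (out ++ [0]) true
      else bInvLoop base rest (out ++ [base - d - 1]) carry

-- the odd-base sign loop: first digit ≠ half decides
def bOddSign (half : Int) : List Int → Bool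
  | [] => false
  | d :: rest => if d ≠ half then decide (d > half) else bOddSign half rest

-- the Horner loop `for d in l: v = v*base + d`
def horner (base : Int) (l : List Int) : Int :=
  l.foldl (fun v d => v * base + d) 0

def inverso_aditivo_alt (base : Int) (representacion : List Int) : Int × List Int :=
  match representacion with
  | [] => (0, [])
  | d0 :: _ =>
      let inverso : List Int := (bInvLoop base representacion.reverse [] true).reverse
      let half : Int := PySem.Int.floordiv base 2
      let neg : Bool :=
        if PySem.Int.mod base 2 = 0 then decide (d0 ≥ half)
        else bOddSign half representacion
      let numero : Int := if neg then -(horner base inverso) else horner base representacion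
      (numero, inverso)

-- ===== PRECONDITION & SPEC =====
-- Pre_ excludes only the inputs where A raises: even base with empty representacion (IndexError in es_negativo).
def Pre_inverso_aditivo (base : Int) (representacion : List Int) : Prop :=
  ¬ (PySem.Int.mod base 2 = 0 ∧ representacion = [])
instance (base : Int) (representacion : List Int) : Decidable (Pre_inverso_aditivo base representacion) := by unfold Pre_inverso_aditivo; infer_instance
def pvWitness_inverso_aditivo : Int × List Int := (10, [3, 7])

def Spec_inverso_aditivo (base : Int) (representacion : List Int) (out : Int × List Int) : Prop := out = inverso_aditivo_alt base representacion
instance (base : Int) (representacion : List Int) (out : Int × List Int) : Decidable (Spec_inverso_aditivo base representacion out) := by unfold Spec_inverso_aditivo; infer_instance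

-- ===== CLAIM (what is proved, stated in full; the proofs are below) =====
def Claim_equal_inverso_aditivo : Prop := ∀ (base : Int) (representacion : List Int), Dom_inverso_aditivo base representacion → Pre_inverso_aditivo base representacion → Spec_inverso_aditivo base representacion (inverso_aditivo base representacion)

-- ===== LEMMAS AND PROOFS =====

-- the common mathematical value: S l = Σ l[i] * base^(len-1-i), defined structurally
def digitsVal (base : Int) : List Int → Int
  | [] => 0
  | d :: t => d * base ^ t.length + digitsVal base t

theorem horner_foldl_eq (base : Int) (l : List Int) (a : Int) :
    l.foldl (fun v d => v * base + d) a = a * base ^ l.length + digitsVal base l := by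
  induction l generalizing a with
  | nil => simp [show digitsVal base [] = 0 from rfl]
  | cons d t ih =>
      simp only [List.foldl_cons, digitsVal, List.length_cons, ih]
      ring

theorem horner_eq_digitsVal (base : Int) (l : List Int) : horner base l = digitsVal base l := by
  simpa using horner_foldl_eq base l 0

theorem decimalGo_acc (base : Int) (rep : List Int) (k : Nat) (res : Int) :
    decimalGo base rep k res = res + decimalGo base rep k 0 := by
  induction k generalizing res with
  | zero => simp [decimalGo]
  | succ i ih =>
      simp only [decimalGo]
      rw [ih, ih (0 + _)]
      ring

theorem decimalGo_append (base : Int) (rep extra : List Int) (k : Nat) (hk : k ≤ rep.length) :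
    decimalGo base (rep ++ extra) k 0 = decimalGo base rep k 0 * base ^ extra.length := by
  induction k with
  | zero => simp [decimalGo]
  | succ i ih =>
      have hi : i < rep.length := hk
      simp only [decimalGo]
      rw [decimalGo_acc, decimalGo_acc base rep i]
      rw [ih (by omega)]
      have hget : (rep ++ extra).getD i 0 = rep.getD i 0 := by
        rw [List.getD_eq_getElem?_getD, List.getD_eq_getElem?_getD,
            List.getElem?_append_left hi]
      rw [hget]
      have hlen : rep.length + extra.length - (i + 1) = (rep.length - (i + 1)) + extra.length := by omega
      simp only [List.length_append, hlen, pow_add]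
      ring

theorem decimalA_eq_digitsVal (base : Int) (l : List Int) : decimalA base l = digitsVal base l := by
  induction l using List.reverseRecOn with
  | nil => simp [decimalA, decimalGo, show digitsVal base [] = 0 from rfl]
  | append_singleton t d ih =>
      have hsd : digitsVal base (t ++ [d]) = digitsVal base t * base + d := by
        clear ih
        induction t with
        | nil => simp [digitsVal]
        | cons x xs ihx => simp only [List.cons_append, digitsVal, ihx, List.length_append,
            List.length_cons, List.length_nil]; ring
      unfold decimalA
      have hlen : (t ++ [d]).length = t.length + 1 := by simp
      rw [hlen]
      simp only [decimalGo]
      rw [decimalGo_acc, decimalGo_append base t [d] t.length le_rfl,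
          show decimalGo base t t.length 0 = decimalA base t from rfl, ih]
      have hget : (t ++ [d]).getD t.length 0 = d := by
        rw [List.getD_eq_getElem?_getD, List.getElem?_append_right le_rfl]
        simp
      rw [hget, hsd]
      simp
      ring

-- the per-digit form both inverse constructions compute (over the reversed digit list)
def scr (base : Int) : List Int → List Int
  | [] => []
  | d :: rest => if 0 < d then (base - d) :: rest.map (fun x => base - x - 1) else 0 :: scr base rest

theorem sumaCarryRev_map (base : Int) (l : List Int) :
    sumaCarryRev base 1 (l.map (fun i => base - i - 1)) = scr base l := by
  induction l with
  | nil => simp [sumaCarryRev, scr]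
  | cons d rest ih =>
      simp only [List.map_cons, sumaCarryRev, scr]
      by_cases hd : 0 < d
      · rw [if_pos (by omega), if_pos hd]
        congr 1
        omega
      · rw [if_neg (by omega), if_neg hd, ih]

theorem bInvLoop_spec (base : Int) (l out : List Int) :
    (bInvLoop base l out true = out ++ scr base l) ∧
    (bInvLoop base l out false = out ++ l.map (fun x => base - x - 1)) := by
  induction l generalizing out with
  | nil => simp [bInvLoop, scr]
  | cons d rest ih =>
      constructor
      · simp only [bInvLoop, scr]
        by_cases hd : d > 0
        · rw [if_pos hd, if_pos hd, (ih _).2]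
          simp
        · rw [if_neg hd, if_neg (by omega : ¬ 0 < d), (ih _).1]
          simp
      · simp only [bInvLoop, List.map_cons]
        rw [if_neg (by simp), (ih _).2]
        simp

theorem esNegOdd_eq_bOddSign (base : Int) (l : List Int) :
    esNegOdd base l = bOddSign (PySem.Int.floordiv base 2) l := by
  induction l with
  | nil => rfl
  | cons d rest ih =>
      simp only [esNegOdd, bOddSign]
      rcases lt_trichotomy d (PySem.Int.floordiv base 2) with h | h | h
      · rw [if_pos h, if_pos (ne_of_lt h)]
        exact (decide_eq_false (lt_asymm h)).symm
      · rw [if_neg (by omega), if_neg (by omega), if_neg (by simp [h]), ih]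
      · rw [if_neg (not_lt.mpr (le_of_lt h)), if_pos h, if_pos (ne_of_gt h)]
        exact (decide_eq_true h).symm

theorem invA_eq_invB (base : Int) (rep : List Int) :
    sumaCarry base (((0 :: rep).map (fun i => base - i - 1)).drop 1) 1
      = (bInvLoop base rep.reverse [] true).reverse := by
  have h1 : ((0 :: rep).map (fun i => base - i - 1)).drop 1 = rep.map (fun i => base - i - 1) := by
    simp
  rw [h1]
  unfold sumaCarry
  rw [← List.map_reverse, sumaCarryRev_map, (bInvLoop_spec base rep.reverse []).1]
  simp

-- ===== VERDICT (by name: the statement is the Claim_ definition above) =====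
theorem inverso_aditivo_spec : Claim_equal_inverso_aditivo := by
  intro base rep _ hpre
  unfold Spec_inverso_aditivo inverso_aditivo inverso_aditivo_alt
  match rep with
  | [] =>
      have hodd : ¬ PySem.Int.mod base 2 = 0 := by
        intro h; exact hpre ⟨h, rfl⟩
      simp only [esNegativo, if_neg hodd, esNegOdd]
      simp [sumaCarry, sumaCarryRev, decimalA, decimalGo]
  | d0 :: t =>
      simp only []
      have hinv := invA_eq_invB base (d0 :: t)
      rw [hinv]
      have hneg : esNegativo base (d0 :: t)
          = (if PySem.Int.mod base 2 = 0 then decide (d0 ≥ PySem.Int.floordiv base 2)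
             else bOddSign (PySem.Int.floordiv base 2) (d0 :: t)) := by
        unfold esNegativo
        by_cases he : PySem.Int.mod base 2 = 0
        · rw [if_pos he, if_pos he]
          simp
        · rw [if_neg he, if_neg he, esNegOdd_eq_bOddSign]
      rw [hneg]
      by_cases hn : (if PySem.Int.mod base 2 = 0 then decide (d0 ≥ PySem.Int.floordiv base 2)
             else bOddSign (PySem.Int.floordiv base 2) (d0 :: t)) = true
      · rw [if_pos hn, if_pos hn]
        rw [decimalA_eq_digitsVal, horner_eq_digitsVal]
      · rw [if_neg hn, if_neg hn]
        rw [decimalA_eq_digitsVal, horner_eq_digitsVal]
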